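-- pv_equiv track=rewrite | github.com/natanka/Keras_this_and_that | mask_layer.py | sub_sampling_structure
-- ===== SOURCE A (Python) =====
-- def sub_sampling_structure(i_context, amount_of_packets,tmp_offset=-1):
--     inp_context =[i - i_context[0] for i in i_context]
--     mx_ind =max(inp_context)
--     if tmp_offset<=0 :
--         offset =2*mx_ind
--     else:
--         offset =mx_ind+tmp_offset
--
--     cond_line =[1 if j % offset in inp_context else 0 for j in  range(amount_of_packets)]
--     return cond_line
-- ===== SOURCE B (Python) =====
-- def sub_sampling_structure(i_context, amount_of_packets, tmp_offset=-1):
--     base = i_context[0]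
--     mx = max(i_context) - base
--     offset = 2 * mx if tmp_offset <= 0 else mx + tmp_offset
--     if amount_of_packets <= 0:
--         return []
--     # one repeating period of the mask; residues >= amount_of_packets can never be hit
--     residues = {i - base for i in i_context}
--     per = min(offset, amount_of_packets)
--     pattern = [1 if r in residues else 0 for r in range(per)]
--     reps = -(-amount_of_packets // offset)
--     return (pattern * reps)[:amount_of_packets]
-- ===== Notes on version B (the rewrite author's own statement) =====
-- stated objective: faster
-- what changed: Instead of computing j % offset and scanning the context list for every packet, B builds a residue set plus the one repeating period of the mask (capped at the requested length), tiles it ceil(amount/offset) times and truncates, so the per-packet list scan disappears.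
import Mathlib
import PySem

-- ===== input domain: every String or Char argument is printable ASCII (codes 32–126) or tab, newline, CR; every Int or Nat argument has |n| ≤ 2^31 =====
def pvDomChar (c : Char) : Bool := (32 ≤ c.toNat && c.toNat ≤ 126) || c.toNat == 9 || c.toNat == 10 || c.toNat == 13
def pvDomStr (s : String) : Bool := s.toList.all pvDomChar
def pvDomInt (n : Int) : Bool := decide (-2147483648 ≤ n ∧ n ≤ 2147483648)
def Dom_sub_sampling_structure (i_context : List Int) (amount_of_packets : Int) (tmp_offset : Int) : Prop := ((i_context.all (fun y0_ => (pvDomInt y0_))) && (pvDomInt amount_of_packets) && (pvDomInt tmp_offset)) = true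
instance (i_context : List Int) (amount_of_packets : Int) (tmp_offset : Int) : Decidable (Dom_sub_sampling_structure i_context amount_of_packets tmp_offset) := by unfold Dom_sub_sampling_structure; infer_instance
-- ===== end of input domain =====

-- B builds a residue set and the one repeating period of the mask (capped at the requested
-- length), then tiles it, instead of taking j % offset and scanning the context list for every
-- packet (objective: faster).


-- ===== PORT A =====
-- i_context[0] → headI and max(...) → (max? …).getD 0: exact on nonempty i_context (Pre_);
-- j % offset → PySem.Int.mod: exact for offset ≠ 0 (Pre_ excludes offset = 0 with a nonempty range).
def sub_sampling_structure (i_context : List Int) (amount_of_packets : Int) (tmp_offset : Int) : List Int :=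
  let inp_context := i_context.map (fun i => i - i_context.headI)
  let mx_ind := (PySem.List.max? inp_context (fun x => x)).getD 0
  let offset := if tmp_offset ≤ 0 then 2 * mx_ind else mx_ind + tmp_offset
  (PySem.List.pyRange 0 amount_of_packets 1).map
    (fun j => if PySem.Int.mod j offset ∈ inp_context then (1 : Int) else 0)

-- ===== PORT B =====
-- max(i_context) → (max? …).getD 0 (exact on nonempty i_context, Pre_); range(per) →
-- pyRange 0 per 1; the set comprehension → PySem.Set.ofList; -(-a // offset) → -(floordiv (-a) offset) (exact for offset ≠ 0, Pre_);
-- pattern * reps → flatten of replicate (reps ≥ 0 here); [:amount] with amount > 0 → take amount.toNat.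
def sub_sampling_structure_alt (i_context : List Int) (amount_of_packets : Int) (tmp_offset : Int) : List Int :=
  let base := i_context.headI
  let mx := (PySem.List.max? i_context (fun x => x)).getD 0 - base
  let offset := if tmp_offset ≤ 0 then 2 * mx else mx + tmp_offset
  if amount_of_packets ≤ 0 then []
  else
    let residues := PySem.Set.ofList (i_context.map (fun i => i - base))
    let per := min offset amount_of_packets
    let pattern := (PySem.List.pyRange 0 per 1).map
      (fun r => if r ∈ residues then (1 : Int) else 0)
    let reps := -(PySem.Int.floordiv (-amount_of_packets) offset)
    ((List.replicate reps.toNat pattern).flatten).take amount_of_packets.toNat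

-- ===== PRECONDITION & SPEC =====
-- helper for Pre_ only: the offset A computes from the input
def pvOffset_sub_sampling_structure (i_context : List Int) (tmp_offset : Int) : Int :=
  let mx := (PySem.List.max? (i_context.map (fun i => i - i_context.headI)) (fun x => x)).getD 0
  if tmp_offset ≤ 0 then 2 * mx else mx + tmp_offset

-- Pre_ excludes exactly the inputs where A raises: empty i_context (IndexError on i_context[0])
-- and offset = 0 with a nonempty range (ZeroDivisionError on j % offset).
def Pre_sub_sampling_structure (i_context : List Int) (amount_of_packets : Int) (tmp_offset : Int) : Prop :=
  i_context ≠ [] ∧ (0 < amount_of_packets → pvOffset_sub_sampling_structure i_context tmp_offset ≠ 0)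
instance (i_context : List Int) (amount_of_packets : Int) (tmp_offset : Int) : Decidable (Pre_sub_sampling_structure i_context amount_of_packets tmp_offset) := by unfold Pre_sub_sampling_structure; infer_instance

def pvWitness_sub_sampling_structure : List Int × Int × Int := ([3, 4, 6], 9, -1)

def Spec_sub_sampling_structure (i_context : List Int) (amount_of_packets : Int) (tmp_offset : Int) (out : List Int) : Prop := out = sub_sampling_structure_alt i_context amount_of_packets tmp_offset
instance (i_context : List Int) (amount_of_packets : Int) (tmp_offset : Int) (out : List Int) : Decidable (Spec_sub_sampling_structure i_context amount_of_packets tmp_offset out) := by unfold Spec_sub_sampling_structure; infer_instance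

-- ===== CLAIM (what is proved, stated in full; the proofs are below) =====
def Claim_equal_sub_sampling_structure : Prop := ∀ (i_context : List Int) (amount_of_packets : Int) (tmp_offset : Int), Dom_sub_sampling_structure i_context amount_of_packets tmp_offset → Pre_sub_sampling_structure i_context amount_of_packets tmp_offset → Spec_sub_sampling_structure i_context amount_of_packets tmp_offset (sub_sampling_structure i_context amount_of_packets tmp_offset)

-- ===== LEMMAS AND PROOFS =====

-- the running max commutes with shifting every element
theorem pv_foldl_max_sub (t : List Int) (a b : Int) :
    (t.map (fun i => i - b)).foldl max (a - b) = t.foldl max a - b := by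
  induction t generalizing a with
  | nil => rfl
  | cons x t ih => simpa [max_sub_sub_right] using ih (max a x)

-- the running max dominates its seed
theorem pv_le_foldl_max (t : List Int) (a : Int) : a ≤ t.foldl max a := by
  induction t generalizing a with
  | nil => exact le_refl a
  | cons x t ih => exact le_trans (le_max_left a x) (ih (max a x))

-- membership in the shifted context
theorem pv_mem_shift (x a : Int) (t : List Int) :
    x ∈ (a - a) :: t.map (fun i => i - a) ↔ (x + a) ∈ a :: t := by
  simp only [List.mem_cons, List.mem_map]
  constructor
  · rintro (h | ⟨i, hi, rfl⟩)
    · left; omega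
    · right; simpa using hi
  · rintro (h | h)
    · left; omega
    · right; exact ⟨x + a, h, by omega⟩

-- element view of the tiled list
theorem pv_flat_rep_getElem? (L : List Int) (n j : Nat) :
    ((List.replicate n L).flatten)[j]? =
      if j < n * L.length then L[j % L.length]? else none := by
  induction n generalizing j with
  | zero => simp
  | succ n ih =>
    have hs : (n + 1) * L.length = n * L.length + L.length := Nat.succ_mul n L.length
    rw [List.replicate_succ, List.flatten_cons, List.getElem?_append, ih (j - L.length)]
    by_cases hj : j < L.length
    · rw [if_pos hj, if_pos (by omega), Nat.mod_eq_of_lt hj]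
    · rw [if_neg hj, ← Nat.mod_eq_sub_mod (by omega)]
      by_cases h2 : j < (n + 1) * L.length
      · rw [if_pos (by omega), if_pos h2]
      · rw [if_neg (by omega), if_neg h2]

theorem sub_sampling_structure_spec_aux (i_context : List Int) (amount_of_packets : Int)
    (tmp_offset : Int) (hne : i_context ≠ [])
    (hoz : 0 < amount_of_packets → pvOffset_sub_sampling_structure i_context tmp_offset ≠ 0) :
    sub_sampling_structure i_context amount_of_packets tmp_offset =
      sub_sampling_structure_alt i_context amount_of_packets tmp_offset := by
  obtain ⟨a, t, rfl⟩ : ∃ a t, i_context = a :: t := by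
    cases i_context with
    | nil => exact absurd rfl hne
    | cons a t => exact ⟨a, t, rfl⟩
  unfold pvOffset_sub_sampling_structure at hoz
  unfold sub_sampling_structure sub_sampling_structure_alt
  simp only [List.headI, List.map_cons, PySem.List.max?_id_cons, Option.getD_some,
    pv_foldl_max_sub t a a] at hoz ⊢
  set mx := t.foldl max a - a with hmxdef
  set off := if tmp_offset ≤ 0 then 2 * mx else mx + tmp_offset with hoffdef
  have hmx0 : 0 ≤ mx := by have := pv_le_foldl_max t a; omega
  have hoff0 : 0 ≤ off := by rw [hoffdef]; split <;> omega
  by_cases hamt : 0 < amount_of_packets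
  · have hoffpos : 0 < off := by have := hoz hamt; omega
    rw [if_neg (by omega : ¬ amount_of_packets ≤ 0)]
    set reps := -(PySem.Int.floordiv (-amount_of_packets) off) with hrepsdef
    have hfd : PySem.Int.floordiv (-amount_of_packets) off = (-amount_of_packets) / off :=
      PySem.Int.floordiv_eq_ediv_of_pos hoffpos
    have hdm := Int.ediv_add_emod (-amount_of_packets) off -- (deprecated alias is fine)
    have hr0 := Int.emod_nonneg (-amount_of_packets) (by omega : off ≠ 0)
    have hrlt := Int.emod_lt_of_pos (-amount_of_packets) hoffpos
    have hge : amount_of_packets ≤ reps * off := by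
      rw [hrepsdef, hfd]; nlinarith [hdm, hr0]
    have hreps0 : 0 < reps := by nlinarith [hge, hamt, hoffpos]
    set per := min off amount_of_packets with hperdef
    have hper0 : 0 < per := lt_min hoffpos hamt
    have hgePer : amount_of_packets ≤ reps * per := by
      rcases le_total off amount_of_packets with h | h
      · rw [hperdef, min_eq_left h]; exact hge
      · rw [hperdef, min_eq_right h]; nlinarith [hreps0, hamt]
    have hgeN : amount_of_packets.toNat ≤ reps.toNat * per.toNat := by
      zify
      rw [Int.toNat_of_nonneg (by omega), Int.toNat_of_nonneg (by omega),
        Int.toNat_of_nonneg (by omega)]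
      exact hgePer
    apply List.ext_getElem?
    intro j
    rw [List.getElem?_take, pv_flat_rep_getElem?]
    simp only [List.getElem?_map, PySem.List.getElem?_pyRange_one, List.length_map,
      PySem.List.length_pyRange_one, sub_zero]
    by_cases hj : j < amount_of_packets.toNat
    · have hk : j % per.toNat < per.toNat := Nat.mod_lt j (by omega)
      rw [if_pos hj, if_pos hj, if_pos (by omega : j < reps.toNat * per.toNat), if_pos hk]
      simp only [Option.map_some, zero_add, PySem.Set.mem_ofList, pv_mem_shift]
      have hmod : PySem.Int.mod ((j : Int)) off = ((j % per.toNat : Nat) : Int) := by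
        rw [PySem.Int.mod_eq_emod_of_pos hoffpos]
        rcases le_total off amount_of_packets with h | h
        · rw [hperdef, min_eq_left h, ← Int.toNat_of_nonneg hoff0]
          exact_mod_cast rfl
        · have h1 : (j : Int) % off = (j : Int) :=
            Int.emod_eq_of_lt (by positivity) (by omega)
          have h2 : j % per.toNat = j := Nat.mod_eq_of_lt (by omega)
          rw [h1, h2]
      simp only [hmod]
    · rw [if_neg hj, if_neg hj]
      simp
  · rw [if_pos (by omega : amount_of_packets ≤ 0),
      PySem.List.pyRange_one_eq_nil (by omega : amount_of_packets ≤ 0), List.map_nil]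

-- ===== VERDICT (by name: the statement is the Claim_ definition above) =====
theorem sub_sampling_structure_spec : Claim_equal_sub_sampling_structure := by
  intro i amt t _ hpre
  unfold Spec_sub_sampling_structure
  exact sub_sampling_structure_spec_aux i amt t hpre.1 hpre.2
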